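-- pv_equiv track=rewrite | github.com/RayranDev/rag_reglamentos | src/chunker.py | obtener_pagina_en_posicion
-- ===== SOURCE A (Python) =====
-- def obtener_pagina_en_posicion(pos: int, mapa_paginas: dict) -> int:
--     """
--     Retorna el número de página para una posición de carácter.
--
--     Args:
--         pos:          Posición del carácter en el texto limpio.
--         mapa_paginas: Mapa construido por limpiar_texto().
--
--     Returns:
--         Número de página.
--     """
--     pagina = 1
--     for posicion_marcador, numero_pagina in sorted(mapa_paginas.items()):
--         if posicion_marcador <= pos:
--             pagina = numero_pagina
--         else:
--             break
--     return pagina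
-- ===== SOURCE B (Python) =====
-- def obtener_pagina_en_posicion(pos: int, mapa_paginas: dict) -> int:
--     """Binary search over the sorted marker positions instead of a linear scan."""
--     claves = sorted(mapa_paginas)
--     lo, hi = 0, len(claves)
--     while lo < hi:
--         medio = (lo + hi) // 2
--         if claves[medio] <= pos:
--             lo = medio + 1
--         else:
--             hi = medio
--     return mapa_paginas[claves[lo - 1]] if lo else 1
-- ===== Notes on version B (the rewrite author's own statement) =====
-- stated objective: alternative
-- what changed: A scans the sorted (position, page) items linearly with a break, carrying a running page; B builds the sorted key list and locates the rightmost marker position <= pos by a hand-rolled binary search (bisect_right), then looks its page up in the dict, with 1 when no marker precedes pos.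
import Mathlib
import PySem

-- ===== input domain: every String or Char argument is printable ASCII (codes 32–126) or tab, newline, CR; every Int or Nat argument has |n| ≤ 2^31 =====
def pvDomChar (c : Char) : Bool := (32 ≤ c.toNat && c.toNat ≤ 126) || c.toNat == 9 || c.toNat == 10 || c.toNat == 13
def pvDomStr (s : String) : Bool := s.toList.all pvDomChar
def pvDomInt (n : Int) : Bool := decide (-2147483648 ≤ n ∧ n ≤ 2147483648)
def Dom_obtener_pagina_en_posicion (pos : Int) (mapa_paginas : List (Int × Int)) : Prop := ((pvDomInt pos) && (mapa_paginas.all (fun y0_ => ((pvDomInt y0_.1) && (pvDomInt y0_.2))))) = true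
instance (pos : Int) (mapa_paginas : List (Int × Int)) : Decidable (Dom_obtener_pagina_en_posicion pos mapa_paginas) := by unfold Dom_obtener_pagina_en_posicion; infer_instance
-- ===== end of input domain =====

-- B replaces A's linear scan over the sorted markers by a hand-rolled binary search over the
-- sorted key list (alternative algorithm; return value only, neither version mutates its input).

-- ===== PORT A =====
-- 'for posicion_marcador, numero_pagina in sorted(mapa_paginas.items()): …' with break:
-- structural recursion carrying the running 'pagina'; 'break' returns the accumulator.
def pvPagLoopA (pos : Int) : List (Int × Int) → Int → Int
  | [], pagina => pagina
  | (posicion_marcador, numero_pagina) :: rest, pagina =>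
    if posicion_marcador ≤ pos then pvPagLoopA pos rest numero_pagina else pagina

def obtener_pagina_en_posicion (pos : Int) (mapa_paginas : List (Int × Int)) : Int :=
  -- sorted(mapa_paginas.items()) sorts (key, value) tuples lexicographically: PySem.List.sorted2
  pvPagLoopA pos (PySem.List.sorted2 (PySem.Dict.ofList mapa_paginas).items Prod.fst Prod.snd) 1

-- ===== PORT B =====
-- 'while lo < hi: …' of Source B; claves[medio] always has 0 ≤ medio < len(claves), so List.getD is
-- exact there, and (lo+hi)//2 on nonnegative ints is exactly Nat division.
def pvBsLoop (pos : Int) (claves : List Int) (lo hi : Nat) : Nat :=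
  if lo < hi then
    let medio := (lo + hi) / 2
    if claves.getD medio 0 ≤ pos then pvBsLoop pos claves (medio + 1) hi
    else pvBsLoop pos claves lo medio
  else lo
termination_by hi - lo
decreasing_by all_goals omega

def obtener_pagina_en_posicion_alt (pos : Int) (mapa_paginas : List (Int × Int)) : Int :=
  let claves := PySem.List.sorted (PySem.Dict.ofList mapa_paginas).keys (fun k => k)
  let lo := pvBsLoop pos claves 0 claves.length
  -- mapa_paginas[claves[lo-1]]: the looked-up key comes from the dict's own keys, so it is always
  -- present and the none-branch of get? is unreachable
  if lo ≠ 0 then ((PySem.Dict.ofList mapa_paginas).get? (claves.getD (lo - 1) 0)).getD 1 else 1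

-- ===== PRECONDITION & SPEC =====
def Spec_obtener_pagina_en_posicion (pos : Int) (mapa_paginas : List (Int × Int)) (out : Int) : Prop := out = obtener_pagina_en_posicion_alt pos mapa_paginas
instance (pos : Int) (mapa_paginas : List (Int × Int)) (out : Int) : Decidable (Spec_obtener_pagina_en_posicion pos mapa_paginas out) := by unfold Spec_obtener_pagina_en_posicion; infer_instance

-- ===== CLAIM (what is proved, stated in full; the proofs are below) =====
def Claim_equal_obtener_pagina_en_posicion : Prop := ∀ (pos : Int) (mapa_paginas : List (Int × Int)), Dom_obtener_pagina_en_posicion pos mapa_paginas → Spec_obtener_pagina_en_posicion pos mapa_paginas (obtener_pagina_en_posicion pos mapa_paginas)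

-- ===== LEMMAS AND PROOFS =====

-- The two comparators of sorted2 (lexicographic on pairs) and sorted (by first component).
def pvLt2 (a b : Int × Int) : Bool := decide (a.1 < b.1) || (!decide (b.1 < a.1) && decide (a.2 < b.2))
def pvLt1 (a b : Int × Int) : Bool := decide (a.1 < b.1)

theorem pvLt_agree (x y : Int × Int) (hne : x.1 ≠ y.1) : pvLt2 x y = pvLt1 x y := by
  rcases lt_or_gt_of_ne hne with h | h
  · simp [pvLt1, pvLt2, h]
  · have h1 : ¬ x.1 < y.1 := by omega
    simp [pvLt1, pvLt2, h, h1]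

theorem pv_insertBy_congr {α : Type} (b b' : α → α → Bool) (x : α) :
    ∀ acc : List α, (∀ y ∈ acc, b x y = b' x y) →
      PySem.List.insertBy b x acc = PySem.List.insertBy b' x acc := by
  intro acc
  induction acc with
  | nil => intro _; rfl
  | cons y ys ih =>
      intro h
      simp only [PySem.List.insertBy]
      rw [h y (by simp)]
      split
      · rfl
      · rw [ih (fun z hz => h z (by simp [hz]))]

theorem pv_foldl_ins_eq : ∀ (xs acc : List (Int × Int)),
    ((acc ++ xs).map Prod.fst).Nodup →
    xs.foldl (fun a x => PySem.List.insertBy pvLt2 x a) acc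
      = xs.foldl (fun a x => PySem.List.insertBy pvLt1 x a) acc := by
  intro xs
  induction xs with
  | nil => intro acc _; rfl
  | cons x rest ih =>
      intro acc hnd
      have hh : (acc.map Prod.fst ++ x.1 :: rest.map Prod.fst).Nodup := by simpa using hnd
      have hx : ∀ y ∈ acc, pvLt2 x y = pvLt1 x y := by
        intro y hy
        apply pvLt_agree
        intro he
        have h1 : x.1 ∈ acc.map Prod.fst := List.mem_map.mpr ⟨y, hy, he.symm⟩
        have h2 : x.1 ∈ x.1 :: rest.map Prod.fst := by simp
        exact (List.disjoint_of_nodup_append hh) h1 h2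
      simp only [List.foldl_cons]
      rw [pv_insertBy_congr pvLt2 pvLt1 x acc hx]
      apply ih
      have hperm : (PySem.List.insertBy pvLt1 x acc ++ rest).Perm (acc ++ x :: rest) := by
        refine ((PySem.List.insertBy_perm pvLt1 x acc).append_right rest).trans ?_
        exact (List.perm_middle (a := x) (l₁ := acc) (l₂ := rest)).symm
      exact ((hperm.map Prod.fst).nodup_iff).mpr hnd

theorem pv_sorted2_eq (xs : List (Int × Int)) (h : (xs.map Prod.fst).Nodup) :
    PySem.List.sorted2 xs Prod.fst Prod.snd = PySem.List.sorted xs Prod.fst := by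
  have := pv_foldl_ins_eq xs [] (by simpa using h)
  simpa [PySem.List.sorted2, PySem.List.sorted, pvLt1, pvLt2] using this

theorem pv_pagLoopA_eq (pos : Int) : ∀ (s : List (Int × Int)) (acc : Int),
    s.Pairwise (fun a b => a.1 ≤ b.1) →
    pvPagLoopA pos s acc
      = ((s.filter (fun p => decide (p.1 ≤ pos))).map Prod.snd).getLastD acc := by
  intro s
  induction s with
  | nil => intro acc _; rfl
  | cons p t ih =>
      intro acc hp
      obtain ⟨k, v⟩ := p
      by_cases hk : k ≤ pos
      · rw [show pvPagLoopA pos ((k, v) :: t) acc = pvPagLoopA pos t v from by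
              simp [pvPagLoopA, hk],
            ih v hp.of_cons,
            List.filter_cons_of_pos (by simpa using hk), List.map_cons, List.getLastD_cons]
      · have hrest : ∀ q ∈ t, ¬ (decide (q.1 ≤ pos) = true) := by
          intro q hq
          have : k ≤ q.1 := List.rel_of_pairwise_cons hp hq
          simp only [decide_eq_true_eq]
          omega
        simp only [pvPagLoopA, if_neg hk, List.filter_cons]
        rw [if_neg (by simp [hk]), List.filter_eq_nil_iff.mpr hrest]
        rfl

theorem pv_filter_eq_takeWhile (pos : Int) : ∀ s : List (Int × Int),
    s.Pairwise (fun a b => a.1 ≤ b.1) →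
    s.filter (fun p => decide (p.1 ≤ pos)) = s.takeWhile (fun p => decide (p.1 ≤ pos)) := by
  intro s
  induction s with
  | nil => intro _; rfl
  | cons p t ih =>
      intro hp
      by_cases hk : p.1 ≤ pos
      · simp only [List.filter_cons, List.takeWhile_cons, decide_eq_true hk]
        simp [ih hp.of_cons]
      · have hrest : ∀ q ∈ t, ¬ (decide (q.1 ≤ pos) = true) := by
          intro q hq
          have : p.1 ≤ q.1 := List.rel_of_pairwise_cons hp hq
          simp only [decide_eq_true_eq]
          omega
        simp only [List.filter_cons, List.takeWhile_cons]
        rw [if_neg (by simp [hk]), if_neg (by simp [hk]), List.filter_eq_nil_iff.mpr hrest]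

-- length of the ≤-pos prefix of the sorted key list
def pvNLE (pos : Int) (ks : List Int) : Nat := (ks.takeWhile (fun k => decide (k ≤ pos))).length

theorem pv_index_iff (pos : Int) (ks : List Int) (hp : ks.Pairwise (· ≤ ·))
    (i : Nat) (hi : i < ks.length) :
    (ks[i] ≤ pos ↔ i < pvNLE pos ks) := by
  obtain ⟨tl, htl⟩ := List.takeWhile_prefix (l := ks) (fun k => decide (k ≤ pos))
  have hlen : pvNLE pos ks ≤ ks.length := by
    have := congrArg List.length htl
    simp only [List.length_append] at this
    simp only [pvNLE]
    omega
  constructor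
  · intro hle
    by_contra hni
    have hni' : pvNLE pos ks ≤ i := by omega
    have hnlt : pvNLE pos ks < ks.length := by omega
    have hdw : ks.dropWhile (fun k => decide (k ≤ pos)) ≠ [] := by
      intro hnil
      have h0 := List.takeWhile_append_dropWhile (p := fun k => decide (k ≤ pos)) (l := ks)
      rw [hnil, List.append_nil] at h0
      have := congrArg List.length h0
      simp only [pvNLE] at hnlt
      omega
    have hfail := List.head_dropWhile_not (fun k => decide (k ≤ pos)) hdw
    have hksn : ks[pvNLE pos ks]'hnlt = (ks.dropWhile (fun k => decide (k ≤ pos))).head hdw := by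
      rw [List.getElem_of_eq
            (List.takeWhile_append_dropWhile (p := fun k => decide (k ≤ pos)) (l := ks)).symm hnlt,
          List.getElem_append_right (by simp [pvNLE])]
      simp only [pvNLE, Nat.sub_self]
      exact (List.head_eq_getElem hdw).symm
    have hmono : ks[pvNLE pos ks]'hnlt ≤ ks[i] := by
      rcases Nat.lt_or_ge (pvNLE pos ks) i with h | h
      · exact List.pairwise_iff_getElem.mp hp _ i hnlt hi h
      · have he : pvNLE pos ks = i := by omega
        subst he; rfl
    rw [hksn] at hmono
    simp only [decide_eq_false_iff_not, not_le] at hfail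
    omega
  · intro hlt
    have hlt' : i < (ks.takeWhile (fun k => decide (k ≤ pos))).length := by
      simpa [pvNLE] using hlt
    have hgi : ks[i] = (ks.takeWhile (fun k => decide (k ≤ pos)))[i]'hlt' := by
      rw [List.getElem_of_eq htl.symm hi, List.getElem_append_left hlt']
    rw [hgi]
    have := List.mem_takeWhile_imp
      (List.getElem_mem (l := ks.takeWhile (fun k => decide (k ≤ pos))) (n := i) hlt')
    simpa using this

theorem pv_bsLoop_eq (pos : Int) (ks : List Int) (hp : ks.Pairwise (· ≤ ·)) :
    ∀ (fuel lo hi : Nat), hi - lo ≤ fuel → lo ≤ pvNLE pos ks → pvNLE pos ks ≤ hi →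
      hi ≤ ks.length → pvBsLoop pos ks lo hi = pvNLE pos ks := by
  intro fuel
  induction fuel with
  | zero =>
      intro lo hi hf h1 h2 h3
      rw [pvBsLoop, if_neg (by omega)]
      omega
  | succ f ih =>
      intro lo hi hf h1 h2 h3
      rw [pvBsLoop]
      by_cases hlh : lo < hi
      · rw [if_pos hlh]
        have hm1 : lo ≤ (lo + hi) / 2 := by omega
        have hm2 : (lo + hi) / 2 < hi := by omega
        have hmlen : (lo + hi) / 2 < ks.length := by omega
        have hget : ks.getD ((lo + hi) / 2) 0 = ks[(lo + hi) / 2] := List.getD_eq_getElem ks 0 hmlen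
        by_cases hc : ks.getD ((lo + hi) / 2) 0 ≤ pos
        · rw [if_pos hc]
          have : (lo + hi) / 2 < pvNLE pos ks := by
            rw [hget] at hc
            exact (pv_index_iff pos ks hp _ hmlen).mp hc
          exact ih ((lo + hi) / 2 + 1) hi (by omega) (by omega) h2 h3
        · rw [if_neg hc]
          have : pvNLE pos ks ≤ (lo + hi) / 2 := by
            rw [hget] at hc
            by_contra hcon
            exact hc ((pv_index_iff pos ks hp _ hmlen).mpr (by omega))
          exact ih lo ((lo + hi) / 2) (by omega) h1 (by omega) (by omega)
      · rw [if_neg hlh]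
        omega

-- ===== VERDICT (by name: the statement is the Claim_ definition above) =====
theorem obtener_pagina_en_posicion_spec : Claim_equal_obtener_pagina_en_posicion := by
  intro pos m _
  show obtener_pagina_en_posicion pos m = obtener_pagina_en_posicion_alt pos m
  set d := PySem.Dict.ofList m with hd
  have hnd : d.keys.Nodup := PySem.Dict.nodup_keys_ofList m
  have hndi : (d.items.map Prod.fst).Nodup := by simpa [PySem.Dict.keys] using hnd
  set s := PySem.List.sorted d.items Prod.fst with hs
  have hps : s.Pairwise (fun a b => a.1 ≤ b.1) := PySem.List.sorted_pairwise d.items Prod.fst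
  set q : Int × Int → Bool := fun p => decide (p.1 ≤ pos) with hq
  -- A's value
  have hA : obtener_pagina_en_posicion pos m
      = ((s.takeWhile q).map Prod.snd).getLastD 1 := by
    show pvPagLoopA pos (PySem.List.sorted2 d.items Prod.fst Prod.snd) 1 = _
    rw [pv_sorted2_eq d.items hndi, ← hs, pv_pagLoopA_eq pos s 1 hps,
        pv_filter_eq_takeWhile pos s hps]
  -- B's sorted key list is the first components of s
  have hperm : (s.map Prod.fst).Perm d.keys := by
    have h0 : s.Perm d.items := PySem.List.sorted_perm d.items Prod.fst false
    simpa [PySem.Dict.keys] using h0.map Prod.fst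
  have hkp : (s.map Prod.fst).Pairwise (· ≤ ·) :=
    PySem.List.sorted_map_key_pairwise d.items Prod.fst
  have hkeys : PySem.List.sorted d.keys (fun k => k) = s.map Prod.fst :=
    PySem.List.sorted_id_eq_of_perm_of_pairwise d.keys (s.map Prod.fst) hperm hkp
  have htw : (s.map Prod.fst).takeWhile (fun k => decide (k ≤ pos)) = (s.takeWhile q).map Prod.fst := by
    rw [List.takeWhile_map]; rfl
  set n := pvNLE pos (s.map Prod.fst) with hn
  have hlen_tw : (s.takeWhile q).length = n := by
    simp only [hn, pvNLE, htw, List.length_map]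
  have hnle : n ≤ (s.map Prod.fst).length := by
    have := (List.takeWhile_prefix (l := s.map Prod.fst) (fun k => decide (k ≤ pos))).length_le
    simpa [hn, pvNLE] using this
  have hB : obtener_pagina_en_posicion_alt pos m
      = if n ≠ 0 then (d.get? ((s.map Prod.fst).getD (n - 1) 0)).getD 1 else 1 := by
    show (if pvBsLoop pos (PySem.List.sorted d.keys (fun k => k)) 0
            (PySem.List.sorted d.keys (fun k => k)).length ≠ 0 then _ else _) = _
    rw [hkeys, pv_bsLoop_eq pos (s.map Prod.fst) hkp (s.map Prod.fst).length 0
          (s.map Prod.fst).length (by omega) (by omega) hnle (le_refl _), ← hn]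
  rw [hA, hB]
  by_cases hn0 : n = 0
  · have : s.takeWhile q = [] := List.eq_nil_of_length_eq_zero (by omega)
    simp [hn0, this]
  · rw [if_pos hn0]
    have htne : s.takeWhile q ≠ [] := by
      intro h; rw [h] at hlen_tw; simp at hlen_tw; omega
    set pr := (s.takeWhile q).getLast htne with hpr
    -- the key B looks up is pr.1
    have hidx : (s.map Prod.fst).getD (n - 1) 0 = pr.1 := by
      have h1 : n - 1 < (s.map Prod.fst).length := by omega
      rw [List.getD_eq_getElem _ 0 h1]
      have hpref : (s.takeWhile q).map Prod.fst <+: s.map Prod.fst := by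
        rw [← htw]; exact List.takeWhile_prefix _
      obtain ⟨tl, htl⟩ := hpref
      have h2 : n - 1 < ((s.takeWhile q).map Prod.fst).length := by
        simp [hlen_tw]; omega
      rw [List.getElem_of_eq htl.symm h1, List.getElem_append_left h2]
      rw [List.getElem_map]
      congr 1
      rw [hpr, List.getLast_eq_getElem]
      congr 1
      omega
    -- A's value is pr.2
    have hsome : (s.takeWhile q).getLast? = some pr := by
      simp [hpr, List.getLast?_eq_some_getLast htne]
    have hAval : ((s.takeWhile q).map Prod.snd).getLastD 1 = pr.2 := by
      rw [List.getLastD_eq_getLast?, List.getLast?_map, hsome]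
      rfl
    -- lookup of pr.1 in d yields pr.2
    have hmem : pr ∈ d.items := by
      have h1 : pr ∈ s.takeWhile q := List.getLast_mem htne
      have h2 : pr ∈ s := (List.takeWhile_prefix q).subset h1
      exact (PySem.List.mem_sorted d.items Prod.fst false pr).mp h2
    have hget : d.get? pr.1 = some pr.2 := by
      obtain ⟨k, v⟩ := pr
      exact PySem.Dict.get?_of_mem_items d hmem hnd
    rw [hidx, hget, hAval]
    rfl
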